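-- pv_equiv track=rewrite | github.com/KDalen/Hangman | HangmanSolver.py | removeWrongWords
-- ===== SOURCE A (Python) =====
-- def removeWrongWords(word, wordsList):
--     length = len(word)
--     newWordsList = []
--     for element in wordsList:
--         if length == len(element):
--             valid = True
--             for i in range(length):
--                 if word[i] != "_" and word[i] != element[i]:
--                     valid = False
--                     break
--             if valid:
--                 newWordsList.append(element)
--     return newWordsList
-- ===== SOURCE B (Python) =====
-- def removeWrongWords(word, wordsList):
--     # Successive refinement: one filtering pass per revealed letter,
--     # instead of a per-candidate scan over all positions.
--     candidates = [e for e in wordsList if len(e) == len(word)]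
--     for i, c in enumerate(word):
--         if c != "_":
--             candidates = [e for e in candidates if e[i] == c]
--     return candidates
-- ===== Notes on version B (the rewrite author's own statement) =====
-- stated objective: alternative
-- what changed: B transposes the loops: it first keeps the words of matching length, then makes one filtering pass over the surviving candidate list per revealed pattern position, successively shrinking the list, instead of A's single pass that scans every position of each candidate with an inline underscore check and a break.
import Mathlib
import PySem

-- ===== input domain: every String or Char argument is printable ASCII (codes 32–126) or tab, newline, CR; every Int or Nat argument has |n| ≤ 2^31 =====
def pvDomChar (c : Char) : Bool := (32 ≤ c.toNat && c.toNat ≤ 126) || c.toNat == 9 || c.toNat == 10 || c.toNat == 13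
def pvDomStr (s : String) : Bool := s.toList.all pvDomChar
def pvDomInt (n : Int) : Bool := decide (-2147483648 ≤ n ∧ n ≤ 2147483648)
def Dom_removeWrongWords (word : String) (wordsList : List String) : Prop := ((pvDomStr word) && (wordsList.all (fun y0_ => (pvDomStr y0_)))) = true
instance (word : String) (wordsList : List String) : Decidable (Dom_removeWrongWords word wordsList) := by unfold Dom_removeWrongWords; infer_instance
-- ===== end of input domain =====

-- B transposes the loops: a length pass first, then one filtering pass over the shrinking
-- candidate list per revealed pattern position, instead of A's per-candidate scan with a break;
-- objective: alternative decomposition (same results, same asymptotic cost).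

-- ===== PORT A =====
-- A's inner 'for i in range(length): … break' loop, as recursion over the index list.
-- word[i] / element[i] are ported with pyGet?; indices from range(length) are always in range
-- when the length guard has passed, so the Option comparisons are exact there.
def pvCheckA (word element : List Char) : List Int → Bool
  | [] => true
  | i :: rest =>
    if PySem.List.pyGet? word i ≠ some '_' ∧ PySem.List.pyGet? word i ≠ PySem.List.pyGet? element i
    then false
    else pvCheckA word element rest

def removeWrongWords (word : String) (wordsList : List String) : List String :=
  let length : Int := (word.toList.length : Int)
  wordsList.foldl (fun newWordsList element =>
    if length = (element.toList.length : Int) then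
      if pvCheckA word.toList element.toList (PySem.List.pyRange 0 length 1) then
        newWordsList ++ [element]
      else newWordsList
    else newWordsList) []

-- ===== PORT B =====
-- staged refinement: filter by length, then fold over enumerate(word), filtering per revealed letter
def removeWrongWords_alt (word : String) (wordsList : List String) : List String :=
  (PySem.List.enumerate word.toList 0).foldl
    (fun cand p =>
      if p.2 ≠ '_' then
        cand.filter (fun e => PySem.List.pyGet? e.toList p.1 == some p.2)
      else cand)
    (wordsList.filter (fun e => e.toList.length == word.toList.length))

-- ===== PRECONDITION & SPEC =====
def Spec_removeWrongWords (word : String) (wordsList : List String) (out : List String) : Prop := out = removeWrongWords_alt word wordsList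
instance (word : String) (wordsList : List String) (out : List String) : Decidable (Spec_removeWrongWords word wordsList out) := by unfold Spec_removeWrongWords; infer_instance

-- ===== CLAIM (what is proved, stated in full; the proofs are below) =====
def Claim_equal_removeWrongWords : Prop := ∀ (word : String) (wordsList : List String), Dom_removeWrongWords word wordsList → Spec_removeWrongWords word wordsList (removeWrongWords word wordsList)

-- ===== LEMMAS AND PROOFS =====

-- A's break loop is an `all` over the index list
theorem pvCheckA_eq_all (word element : List Char) (L : List Int) :
    pvCheckA word element L
      = L.all (fun i => !(decide (PySem.List.pyGet? word i ≠ some '_')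
                          && decide (PySem.List.pyGet? word i ≠ PySem.List.pyGet? element i))) := by
  induction L with
  | nil => rfl
  | cons i rest ih =>
    simp only [pvCheckA, List.all_cons, ih]
    split <;> rename_i h
    · rcases h with ⟨h1, h2⟩
      simp [h1, h2]
    · rw [not_and_or] at h
      rcases h with h | h <;> simp [not_not.mp h]

theorem all_congr_mem {α : Type} (l : List α) (f g : α → Bool)
    (h : ∀ a ∈ l, f a = g a) : l.all f = l.all g := by
  induction l with
  | nil => rfl
  | cons x xs ih => simp only [List.all_cons, h x (List.mem_cons_self ..),
      ih (fun a ha => h a (List.mem_cons_of_mem _ ha))]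

theorem enumerate_all {α : Type} (w : List α) (d : α) :
    ∀ (s : Int) (q : Int × α → Bool),
    (PySem.List.enumerate w s).all q
      = (List.range w.length).all (fun k => q (s + (k : Int), w.getD k d)) := by
  induction w with
  | nil => intro s q; rfl
  | cons c w ih =>
    intro s q
    rw [PySem.List.enumerate_cons, List.all_cons, ih (s + 1)]
    simp only [List.length_cons, List.range_succ_eq_map, List.all_cons, List.all_map]
    congr 1
    · simp
    · apply all_congr_mem
      intro k _
      simp only [Function.comp, List.getD_cons_succ]
      congr 1
      push_cast
      ring_nf

theorem beq_symm_decide (a b : Char) : (b == a) = decide (a = b) := by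
  by_cases h : a = b
  · simp [h]
  · simp [h, show ¬ b = a from fun hb => h hb.symm]

-- the per-candidate tests of A and B agree when the lengths agree
theorem inner_eq (w e : List Char) (h : w.length = e.length) :
    pvCheckA w e (PySem.List.pyRange 0 (w.length : Int) 1)
      = (PySem.List.enumerate w 0).all
          (fun p => !decide (p.2 ≠ '_') || (PySem.List.pyGet? e p.1 == some p.2)) := by
  rw [pvCheckA_eq_all, enumerate_all w '_' 0, PySem.List.pyRange_zero_nat, List.all_map]
  apply all_congr_mem
  intro k hk
  rw [List.mem_range] at hk
  have hk' : k < e.length := h ▸ hk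
  have hw : PySem.List.pyGet? w (k : Int) = some (w.getD k '_') := by
    rw [PySem.List.pyGet?_natCast, List.getD_eq_getElem w '_' hk, List.getElem?_eq_getElem hk]
  have he : PySem.List.pyGet? e (k : Int) = some (e.getD k '_') := by
    rw [PySem.List.pyGet?_natCast, List.getD_eq_getElem e '_' hk', List.getElem?_eq_getElem hk']
  simp only [Function.comp, zero_add, hw, he]
  by_cases hu : w.getD k '_' = '_' <;>
    by_cases hm : w.getD k '_' = e.getD k '_' <;>
      simp [hu, hm, beq_symm_decide]

-- a chain of conditional filtering passes is one filter by the conjunction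
theorem foldl_filter_chain {α β : Type} (cond : β → Prop) [DecidablePred cond] (f : β → α → Bool) :
    ∀ (L : List β) (init : List α),
    L.foldl (fun acc p => if cond p then acc.filter (f p) else acc) init
      = init.filter (fun e => L.all (fun p => !decide (cond p) || f p e)) := by
  intro L
  induction L with
  | nil => intro init; simp
  | cons p rest ih =>
    intro init
    rw [List.foldl_cons]
    by_cases hc : cond p
    · rw [if_pos hc, ih, List.filter_filter]
      simp [hc, List.all_cons, Bool.and_comm]
    · rw [if_neg hc, ih]
      simp [hc, List.all_cons]

-- the outer fold of A builds the filtered list directly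
theorem fold_eq (word : String) (l : List String) : ∀ (acc : List String),
    l.foldl (fun newWordsList element =>
      if (word.toList.length : Int) = (element.toList.length : Int) then
        if pvCheckA word.toList element.toList (PySem.List.pyRange 0 (word.toList.length : Int) 1) then
          newWordsList ++ [element]
        else newWordsList
      else newWordsList) acc
    = acc ++ l.filter (fun e =>
        (e.toList.length == word.toList.length) &&
        (PySem.List.enumerate word.toList 0).all
          (fun p => !decide (p.2 ≠ '_') || (PySem.List.pyGet? e.toList p.1 == some p.2))) := by
  induction l with
  | nil => intro acc; simp
  | cons x xs ih =>
    intro acc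
    rw [List.foldl_cons, List.filter_cons]
    by_cases hl : (word.toList.length : Int) = (x.toList.length : Int)
    · have hn : word.toList.length = x.toList.length := by exact_mod_cast hl
      rw [if_pos hl, inner_eq word.toList x.toList hn]
      have hx : (x.toList.length == word.toList.length) = true := by simp [hn]
      rw [hx, Bool.true_and]
      by_cases hc : (PySem.List.enumerate word.toList 0).all
          (fun p => !decide (p.2 ≠ '_') || (PySem.List.pyGet? x.toList p.1 == some p.2)) = true
      · rw [hc, if_pos rfl, if_pos rfl, ih]
        simp
      · have hc' := Bool.eq_false_iff.mpr hc
        rw [hc', ih]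
        simp
    · have hx : (x.toList.length == word.toList.length) = false := by
        simp; intro hh; exact hl (by exact_mod_cast hh.symm)
      rw [if_neg hl, ih, hx, Bool.false_and]
      simp

-- ===== VERDICT (by name: the statement is the Claim_ definition above) =====
theorem removeWrongWords_spec : Claim_equal_removeWrongWords := by
  intro word wordsList _
  unfold Spec_removeWrongWords removeWrongWords removeWrongWords_alt
  rw [fold_eq word wordsList [], foldl_filter_chain, List.filter_filter]
  simp [Bool.and_comm]
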